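-- pv_equiv track=rewrite | github.com/Hyokiz/Algorithm | 프로그래머스/unrated/142086. 가장 가까운 같은 글자/가장 가까운 같은 글자.py | solution
-- ===== SOURCE A (Python) =====
-- def solution(s):
--     answer = []
--     for i in range(len(s) - 1, 0, -1):
--         for j in range(i - 1, -1, -1):
--             if s[i] == s[j]:
--                 answer.append(abs(j - i))
--                 break
--         else:
--             answer.append(-1)
--     answer.append(-1)
--
--     return answer[::-1]
-- ===== SOURCE B (Python) =====
-- def solution(s):
--     last = {}
--     answer = []
--     for i, c in enumerate(s):
--         answer.append(i - last[c] if c in last else -1)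
--         last[c] = i
--     return answer
-- ===== Notes on version B (the rewrite author's own statement) =====
-- stated objective: faster
-- what changed: Replaced the reversed quadratic nested scan (for each position, walk backwards to find an equal character) by a single forward pass that keeps a last-seen-index dict and appends i - last[c] (or -1) per position.
-- intended difference: On the empty string A returns [-1] (its unconditional trailing append), while B returns the intended [], the per-position answer list of length len(s). — e.g. on solution(""): A returns [-1], B returns []
import Mathlib
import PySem

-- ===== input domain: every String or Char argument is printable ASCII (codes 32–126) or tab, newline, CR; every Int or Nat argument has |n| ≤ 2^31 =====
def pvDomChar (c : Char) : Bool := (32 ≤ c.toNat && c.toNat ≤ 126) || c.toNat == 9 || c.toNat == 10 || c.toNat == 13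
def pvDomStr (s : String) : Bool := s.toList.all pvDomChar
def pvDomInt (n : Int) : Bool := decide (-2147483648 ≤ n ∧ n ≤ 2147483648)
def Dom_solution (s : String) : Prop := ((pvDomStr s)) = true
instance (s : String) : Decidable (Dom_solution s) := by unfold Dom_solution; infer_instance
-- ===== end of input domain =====

-- B replaces A's reversed quadratic backwards scan by one forward pass with a last-seen-index dict (faster).

-- ===== PORT A =====
-- inner for-else loop: state none = not yet broken, some v = value appended by 'break'
def solutionInnerStep (cs : List Char) (i : Int) (st : Option Int) (j : Int) : Option Int :=
  match st with
  | some v => some v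
  | none => if PySem.List.pyGetD cs i ' ' = PySem.List.pyGetD cs j ' ' then some |j - i| else none

def solution (s : String) : List Int :=
  let cs := s.toList
  let answer := (PySem.List.pyRange ((cs.length : Int) - 1) 0 (-1)).foldl (fun ans i =>
    match (PySem.List.pyRange (i - 1) (-1) (-1)).foldl (solutionInnerStep cs i) none with
    | some v => ans ++ [v]
    | none => ans ++ [-1]) []
  let answer := answer ++ [-1]
  answer.reverse    -- answer[::-1]; exact per PySem.List.slice?_none_none_neg_one

-- ===== PORT B =====
def solution_alt (s : String) : List Int :=
  ((PySem.List.enumerate s.toList 0).foldl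
    (fun (st : PySem.Dict Char Int × List Int) p =>
      (st.1.insert p.2 p.1,
       st.2 ++ [if st.1.contains p.2 then p.1 - st.1.getD p.2 0 else -1]))
    (PySem.Dict.empty, [])).2

-- ===== PRECONDITION & SPEC =====
-- On the empty string A returns [-1] (its unconditional trailing append), while B returns the
-- intended [], the per-position answer list of length len(s).
def D_solution (s : String) : Prop := s = ""
instance (s : String) : Decidable (D_solution s) := by unfold D_solution; infer_instance
def Spec_solution (s : String) (out : List Int) : Prop := ¬ D_solution s → out = solution_alt s
instance (s : String) (out : List Int) : Decidable (Spec_solution s out) := by unfold Spec_solution; infer_instance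
def pvDiffWitness_solution : String := ""
def pvDiffWitnessOut_solution : (List Int) × (List Int) := ([-1], [])

-- ===== CLAIM (what is proved, stated in full; the proofs are below) =====
def Claim_unchanged_solution : Prop := ∀ (s : String), Dom_solution s → Spec_solution s (solution s)
def Claim_changed_solution : Prop := Dom_solution (pvDiffWitness_solution) ∧ D_solution (pvDiffWitness_solution) ∧ solution (pvDiffWitness_solution) = pvDiffWitnessOut_solution.1 ∧ solution_alt (pvDiffWitness_solution) = pvDiffWitnessOut_solution.2 ∧ pvDiffWitnessOut_solution.1 ≠ pvDiffWitnessOut_solution.2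
def Claim_exact_solution : Prop := ∀ (s : String), Dom_solution s → D_solution s → solution s ≠ solution_alt s

-- ===== LEMMAS AND PROOFS =====

-- index of the last occurrence of c in a list (none if absent)
def lastOcc (c : Char) : List Char → Option Nat
  | [] => none
  | x :: xs =>
    match lastOcc c xs with
    | some j => some (j + 1)
    | none => if x = c then some 0 else none

-- the reference value at position i of cs
def specAt (cs : List Char) (i : Nat) : Int :=
  match lastOcc (cs.getD i ' ') (cs.take i) with
  | some j => (i : Int) - j
  | none => -1

-- A's inner scan, as a downward recursion on the first index not yet tried
def findPrev (cs : List Char) (t : Char) : Nat → Option Nat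
  | 0 => none
  | j + 1 => if t = cs.getD j ' ' then some j else findPrev cs t j

theorem lastOcc_append (c x : Char) (l : List Char) :
    lastOcc c (l ++ [x]) = if x = c then some l.length else lastOcc c l := by
  induction l with
  | nil => simp [lastOcc]
  | cons y l ih =>
    simp only [List.cons_append, lastOcc, ih]
    by_cases h : x = c
    · simp [h]
    · simp only [if_neg h]

theorem lastOcc_lt (c : Char) (l : List Char) (j : Nat) (h : lastOcc c l = some j) :
    j < l.length := by
  induction l generalizing j with
  | nil => simp [lastOcc] at h
  | cons y l ih =>
    simp only [lastOcc] at h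
    cases hl : lastOcc c l with
    | some k =>
      rw [hl] at h; simp only [Option.some.injEq] at h
      have := ih k hl
      simp only [List.length_cons]; omega
    | none =>
      rw [hl] at h
      by_cases hy : y = c
      · rw [if_pos hy] at h
        simp only [Option.some.injEq] at h
        simp only [List.length_cons]; omega
      · rw [if_neg hy] at h; exact absurd h (by simp)

theorem take_succ_getD (cs : List Char) (j : Nat) (h : j < cs.length) :
    cs.take (j + 1) = cs.take j ++ [cs.getD j ' '] := by
  have hg : cs.getD j ' ' = cs[j] := by
    simp [List.getD_eq_getElem?_getD, List.getElem?_eq_getElem h]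
  rw [hg, List.take_add_one, List.getElem?_eq_getElem h]
  rfl

theorem findPrev_eq_lastOcc (cs : List Char) (t : Char) (j : Nat) (h : j ≤ cs.length) :
    findPrev cs t j = lastOcc t (cs.take j) := by
  induction j with
  | zero => simp [findPrev, lastOcc]
  | succ j ih =>
    rw [findPrev, take_succ_getD cs j (by omega), lastOcc_append, ih (by omega)]
    by_cases hc : t = cs.getD j ' '
    · simp [hc, List.length_take, Nat.min_eq_left (by omega : j ≤ cs.length)]
    · rw [if_neg hc, if_neg (fun h' => hc h'.symm)]

theorem foldl_step_some (cs : List Char) (i v : Int) (l : List Int) :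
    l.foldl (solutionInnerStep cs i) (some v) = some v := by
  induction l with
  | nil => rfl
  | cons x l ih => simpa [solutionInnerStep] using ih

theorem pyRange_down (a b : Int) :
    PySem.List.pyRange a b (-1)
      = (List.range (a - b).toNat).map (fun k : Nat => a - (k : Int)) := by
  rw [PySem.List.pyRange_neg_one]

theorem inner_eq (cs : List Char) (i : Nat) :
    ∀ m : Nat, m ≤ i →
    ((List.range m).map (fun k : Nat => ((m : Int) - 1 - (k : Int)))).foldl
        (solutionInnerStep cs (i : Int)) none
      = Option.map (fun j : Nat => |(j : Int) - (i : Int)|) (findPrev cs (cs.getD i ' ') m) := by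
  intro m
  induction m with
  | zero => intro _; simp [findPrev]
  | succ m ih =>
    intro hm
    have hlist : (List.range (m + 1)).map (fun k : Nat => (((m + 1 : Nat) : Int) - 1 - (k : Int)))
        = (m : Int) :: (List.range m).map (fun k : Nat => ((m : Int) - 1 - (k : Int))) := by
      rw [List.range_succ_eq_map]
      simp only [List.map_cons, List.map_map]
      refine congrArg₂ List.cons ?_ ?_
      · push_cast; ring
      · exact List.map_congr_left (fun k _ => by
          simp only [Function.comp_apply]; push_cast; ring)
    rw [hlist, List.foldl_cons]
    have hget : PySem.List.pyGetD cs (i : Int) ' ' = cs.getD i ' ' := by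
      simp [PySem.List.pyGetD_natCast]
    have hgetm : PySem.List.pyGetD cs (m : Int) ' ' = cs.getD m ' ' := by
      simp [PySem.List.pyGetD_natCast]
    by_cases hc : cs.getD i ' ' = cs.getD m ' '
    · simp only [solutionInnerStep, hget, hgetm, if_pos hc]
      rw [foldl_step_some, findPrev, if_pos hc]
      simp
    · simp only [solutionInnerStep, hget, hgetm, if_neg hc]
      rw [ih (by omega), findPrev, if_neg hc]

theorem outer_val_eq (cs : List Char) (i : Nat) (h0 : 0 < i) (hi : i < cs.length) :
    (match (PySem.List.pyRange ((i : Int) - 1) (-1) (-1)).foldl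
        (solutionInnerStep cs (i : Int)) none with
     | some v => v
     | none => (-1 : Int)) = specAt cs i := by
  have hrange : PySem.List.pyRange ((i : Int) - 1) (-1) (-1)
      = (List.range i).map (fun k : Nat => ((i : Int) - 1 - (k : Int))) := by
    rw [pyRange_down]
    have : ((i : Int) - 1 - (-1)).toNat = i := by omega
    rw [this]
  rw [hrange, inner_eq cs i i le_rfl,
      findPrev_eq_lastOcc cs _ i (by omega)]
  unfold specAt
  cases hL : lastOcc (cs.getD i ' ') (cs.take i) with
  | none => rfl
  | some j =>
    have hj : j < i := by
      have := lastOcc_lt _ _ _ hL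
      simp [List.length_take] at this; omega
    simp only [Option.map_some]
    have : |(j : Int) - i| = (i : Int) - j := by
      rw [abs_of_nonpos (by omega)]; ring
    rw [this]

theorem rev_map_range (f : Nat → Int) (m : Nat) :
    ((List.range m).map f).reverse = (List.range m).map (fun k => f (m - 1 - k)) := by
  apply List.ext_getElem (by simp)
  intro i h1 h2
  simp only [List.getElem_reverse, List.getElem_map, List.getElem_range,
    List.length_map, List.length_range]

-- A computes the reference list (nonempty input)
theorem solution_eq_spec (s : String) (hne : s.toList ≠ []) :
    solution s = (List.range s.toList.length).map (specAt s.toList) := by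
  set cs := s.toList with hcs
  have hn : 0 < cs.length := by rw [hcs]; exact List.length_pos_of_ne_nil hne
  unfold solution
  rw [← hcs]
  simp only []
  have hbody : (fun (ans : List Int) (i : Int) =>
      match (PySem.List.pyRange (i - 1) (-1) (-1)).foldl (solutionInnerStep cs i) none with
      | some v => ans ++ [v]
      | none => ans ++ [-1])
    = fun (ans : List Int) (i : Int) => ans ++
        [match (PySem.List.pyRange (i - 1) (-1) (-1)).foldl (solutionInnerStep cs i) none with
         | some v => v
         | none => (-1 : Int)] := by
    funext ans i
    cases (PySem.List.pyRange (i - 1) (-1) (-1)).foldl (solutionInnerStep cs i) none <;> rfl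
  rw [hbody, PySem.List.foldl_append_singleton_eq_map]
  · rw [pyRange_down]
    have ht : (((cs.length : Int) - 1) - 0).toNat = cs.length - 1 := by omega
    rw [ht]
    simp only [List.nil_append, List.reverse_append, List.reverse_singleton,
      List.singleton_append]
    rw [List.map_map, rev_map_range]
    have hr : (List.range cs.length).map (specAt cs)
        = specAt cs 0 :: (List.range (cs.length - 1)).map (fun k => specAt cs (k + 1)) := by
      have : cs.length = (cs.length - 1) + 1 := by omega
      rw [this, List.range_succ_eq_map]
      simp only [List.map_cons, List.map_map]
      refine congrArg₂ List.cons rfl ?_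
      exact List.map_congr_left (fun k _ => by
        simp only [Function.comp_apply, Nat.succ_eq_add_one])
    rw [hr]
    have h0 : specAt cs 0 = -1 := by simp [specAt, lastOcc]
    rw [h0]
    congr 1
    apply List.map_congr_left
    intro k hk
    simp only [List.mem_range] at hk
    simp only [Function.comp_apply]
    have harg : ((cs.length : Int) - 1 - ((cs.length - 1 - 1 - k : Nat) : Int))
        = ((k + 1 : Nat) : Int) := by push_cast; omega
    calc (fun i => (match (PySem.List.pyRange (i - 1) (-1) (-1)).foldl
            (solutionInnerStep cs i) none with
          | some v => v
          | none => (-1 : Int))) ((cs.length : Int) - 1 - ((cs.length - 1 - 1 - k : Nat) : Int))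
        = (match (PySem.List.pyRange (((k + 1 : Nat) : Int) - 1) (-1) (-1)).foldl
            (solutionInnerStep cs ((k + 1 : Nat) : Int)) none with
          | some v => v
          | none => (-1 : Int)) := by rw [harg]
      _ = specAt cs (k + 1) := outer_val_eq cs (k + 1) (by omega) (by omega)

-- the dict represents the prefix's last-occurrence table
def DictRepr (d : PySem.Dict Char Int) (pre : List Char) : Prop :=
  ∀ c, d.contains c = (lastOcc c pre).isSome ∧
       ∀ j, lastOcc c pre = some j → d.getD c 0 = (j : Int)

theorem dictRepr_step (d : PySem.Dict Char Int) (pre : List Char) (c : Char)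
    (h : DictRepr d pre) : DictRepr (d.insert c (pre.length : Int)) (pre ++ [c]) := by
  intro c'
  rw [lastOcc_append]
  by_cases hcc : c = c'
  · subst hcc
    constructor
    · simp
    · intro j hj
      simp at hj
      rw [PySem.Dict.getD_insert, if_pos rfl, hj]
  · rw [if_neg hcc]
    constructor
    · rw [PySem.Dict.contains_insert, (h c').1]
      simp [Ne.symm hcc]
    · intro j hj
      rw [PySem.Dict.getD_insert, if_neg (Ne.symm hcc)]
      exact (h c').2 j hj

theorem b_loop (rest : List Char) : ∀ (pre : List Char) (d : PySem.Dict Char Int)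
    (acc : List Int), DictRepr d pre →
    ((PySem.List.enumerate rest (pre.length : Int)).foldl
      (fun (st : PySem.Dict Char Int × List Int) p =>
        (st.1.insert p.2 p.1,
         st.2 ++ [if st.1.contains p.2 then p.1 - st.1.getD p.2 0 else -1]))
      (d, acc)).2
    = acc ++ (List.range rest.length).map (fun k => specAt (pre ++ rest) (pre.length + k)) := by
  induction rest with
  | nil => intro pre d acc _; simp [PySem.List.enumerate]
  | cons c rest ih =>
    intro pre d acc h
    rw [PySem.List.enumerate_cons, List.foldl_cons]
    have hv : (if d.contains c then (pre.length : Int) - d.getD c 0 else -1)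
        = specAt (pre ++ c :: rest) pre.length := by
      unfold specAt
      have htake : (pre ++ c :: rest).take pre.length = pre := List.take_left
      have hgd : (pre ++ c :: rest).getD pre.length ' ' = c := by
        rw [List.getD_eq_getElem?_getD, List.getElem?_append_right le_rfl]
        simp
      rw [htake, hgd, (h c).1]
      cases hL : lastOcc c pre with
      | none => simp
      | some j => simp [(h c).2 j hL]
    have hlen : (pre.length : Int) + 1 = ((pre ++ [c]).length : Int) := by simp
    rw [hlen]
    rw [ih (pre ++ [c]) _ _ (dictRepr_step d pre c h)]
    rw [hv]
    have hassoc : (pre ++ [c]) ++ rest = pre ++ c :: rest := by simp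
    rw [hassoc]
    rw [List.append_assoc, List.singleton_append]
    congr 1
    rw [List.length_cons, List.range_succ_eq_map]
    simp only [List.map_cons, List.map_map, Nat.add_zero]
    congr 1
    apply List.map_congr_left
    intro k _
    have : pre.length + (k + 1) = (pre ++ [c]).length + k := by simp; omega
    rw [Function.comp_apply, this]

theorem solution_alt_eq_spec (s : String) :
    solution_alt s = (List.range s.toList.length).map (specAt s.toList) := by
  unfold solution_alt
  have h0 : DictRepr PySem.Dict.empty [] := by
    intro c
    constructor
    · simp [lastOcc]
    · intro j hj; simp [lastOcc] at hj
  have := b_loop s.toList [] PySem.Dict.empty [] h0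
  simpa using this

-- ===== VERDICT (by name: the statement is the Claim_ definition above) =====
theorem solution_spec : Claim_unchanged_solution := by
  intro s _ hnd
  rw [solution_alt_eq_spec]
  apply solution_eq_spec
  intro h
  exact hnd (by simpa [D_solution] using String.toList_inj.mp (by simpa using h))

theorem solution_changed : Claim_changed_solution := by
  unfold Claim_changed_solution; decide

theorem solution_tight : Claim_exact_solution := by
  intro s _ hd
  rw [hd]
  decide
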